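-- pv_equiv track=rewrite | github.com/bemarble96/bioinformatics-2020-07 | test2-5-2.py | mer
-- ===== SOURCE A (Python) =====
-- def mer(base1,base2,n):
--     if n ==1:
--         return base2
--
--     list = []
--     for i in base1:
--         for p in base2:
--             list.append(i+p)
--     return mer(base1,list,n-1)
-- ===== SOURCE B (Python) =====
-- def mer(base1, base2, n):
--     if n == 1:
--         return base2
--     cur = base2
--     while n != 1:
--         cur = [i + p for i in base1 for p in cur]
--         n -= 1
--     return cur
-- ===== Notes on version B (the rewrite author's own statement) =====
-- stated objective: simpler
-- what changed: Replaced A's tail recursion (which rebuilds the product list with nested append loops and recurses with n-1) by a single explicit while-loop that keeps a 'current' list and rebuilds it with a comprehension until n reaches 1.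
import Mathlib
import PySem

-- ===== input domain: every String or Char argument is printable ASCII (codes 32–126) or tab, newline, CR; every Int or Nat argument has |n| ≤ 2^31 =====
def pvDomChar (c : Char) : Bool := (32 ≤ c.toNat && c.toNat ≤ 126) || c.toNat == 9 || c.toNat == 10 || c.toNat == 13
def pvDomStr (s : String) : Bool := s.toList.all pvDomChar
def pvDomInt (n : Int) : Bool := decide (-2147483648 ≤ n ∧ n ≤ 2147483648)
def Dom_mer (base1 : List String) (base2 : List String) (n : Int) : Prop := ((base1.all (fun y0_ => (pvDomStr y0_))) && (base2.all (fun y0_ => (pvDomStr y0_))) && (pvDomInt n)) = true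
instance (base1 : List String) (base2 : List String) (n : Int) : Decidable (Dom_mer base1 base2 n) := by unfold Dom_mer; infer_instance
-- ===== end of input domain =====

-- B replaces A's tail recursion by an explicit while-loop over a 'current' list; same cost, simpler shape. Equivalence is about the return value.

-- ===== PORT A =====
-- A recurses with n-1 until n == 1; the recursion depth is n.toNat (for n ≥ 1 exactly
-- the Python recursion; n < 1 is excluded by Pre_mer, where Python recurses forever).
def merA (base1 : List String) : Nat → List String → List String
  | 0, base2 => base2
  | 1, base2 => base2
  | (k+2), base2 =>
      merA base1 (k+1)
        (base1.foldl (fun acc i => base2.foldl (fun acc2 p => acc2 ++ [i ++ p]) acc) [])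

def mer (base1 : List String) (base2 : List String) (n : Int) : List String :=
  merA base1 n.toNat base2

-- ===== PORT B =====
-- one loop-body step: [i + p for i in base1 for p in cur]
def merStep (base1 : List String) (cur : List String) : List String :=
  base1.flatMap (fun i => cur.map (fun p => i ++ p))

def mer_alt (base1 : List String) (base2 : List String) (n : Int) : List String :=
  if n = 1 then base2
  else (merStep base1)^[(n - 1).toNat] base2

-- ===== PRECONDITION & SPEC =====
-- For n < 1 the Python A never returns (infinite recursion → RecursionError), so those inputs are excluded.
def Pre_mer (_base1 : List String) (_base2 : List String) (n : Int) : Prop := 1 ≤ n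
instance (base1 : List String) (base2 : List String) (n : Int) : Decidable (Pre_mer base1 base2 n) := by unfold Pre_mer; infer_instance

def pvWitness_mer : List String × List String × Int := (["a", "b"], ["x", "y"], 2)

def Spec_mer (base1 : List String) (base2 : List String) (n : Int) (out : List String) : Prop := out = mer_alt base1 base2 n
instance (base1 : List String) (base2 : List String) (n : Int) (out : List String) : Decidable (Spec_mer base1 base2 n out) := by unfold Spec_mer; infer_instance

-- ===== CLAIM (what is proved, stated in full; the proofs are below) =====
def Claim_equal_mer : Prop := ∀ (base1 : List String) (base2 : List String) (n : Int), Dom_mer base1 base2 n → Pre_mer base1 base2 n → Spec_mer base1 base2 n (mer base1 base2 n)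

-- ===== LEMMAS AND PROOFS =====

-- A's nested append loops build exactly one merStep.
theorem merA_body_eq (base1 base2 : List String) :
    base1.foldl (fun acc i => base2.foldl (fun acc2 p => acc2 ++ [i ++ p]) acc) [] =
      merStep base1 base2 := by
  have h : ∀ (i : String) (acc : List String),
      base2.foldl (fun acc2 p => acc2 ++ [i ++ p]) acc = acc ++ base2.map (fun p => i ++ p) :=
    fun i acc => PySem.List.foldl_append_singleton_eq_map _ _ _
  simp only [h]
  unfold merStep
  exact PySem.List.foldl_append_eq_flatMap _ _ _

-- With fuel k+1, A's recursion is k iterations of merStep.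
theorem merA_eq_iterate (base1 : List String) :
    ∀ (k : Nat) (base2 : List String), merA base1 (k + 1) base2 = (merStep base1)^[k] base2 := by
  intro k
  induction k with
  | zero => intro base2; rfl
  | succ m ih =>
      intro base2
      show merA base1 (m + 2) base2 = _
      rw [merA, merA_body_eq, ih, ← Function.iterate_succ_apply]

-- ===== VERDICT (by name: the statement is the Claim_ definition above) =====
theorem mer_spec : Claim_equal_mer := by
  intro base1 base2 n _ hpre
  unfold Pre_mer at hpre
  unfold Spec_mer mer mer_alt
  have hn : n.toNat = (n - 1).toNat + 1 := by omega
  rw [hn, merA_eq_iterate]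
  split_ifs with h1
  · subst h1; rfl
  · rfl
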